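-- pv_equiv track=rewrite | github.com/Yoga838/Kuliah | Tugas Mau Uas/security.py | shifting
-- ===== SOURCE A (Python) =====
-- def shifting(text, shift_number): # Pembuatan fungsi dengan nama shifting dengan syarat fungsi dua parameter
--     result = '' # inisiasi string ke dalam variabel result
--     for i in text: # perulangan sebanyak isi variabel text
--         shifted = (ord(i)+shift_number)%127 # pengubahan struktur ascii awal kemudian di simpan ke dalam variabel shifted
--         if shifted<=32: # pengkondisian ketika nilai variabel shifted kurang dari atau sama dengan 32
--             shifted+=32 # variabel shifted ditambahkan nilai 32
--         result += chr(shifted) # mengubah nilai ascii shifted ke dalam bentuk karakter kemudian di tambahkan ke dalam variabel result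
--     return result #mengembalikan nilai yang diperoleh kedalam variabel result
-- ===== SOURCE B (Python) =====
-- def shifting(text, shift_number):
--     # Build a translation table over the distinct characters, then map in one call.
--     table = {}
--     for c in dict.fromkeys(text):
--         shifted = (ord(c) + shift_number) % 127
--         if shifted <= 32:
--             shifted += 32
--         table[ord(c)] = chr(shifted)
--     return text.translate(table)
-- ===== Notes on version B (the rewrite author's own statement) =====
-- stated objective: faster
-- what changed: B precomputes an ordinal-to-character translation table over the distinct characters of text and applies it with a single str.translate call, instead of A's per-character Python loop with string concatenation.
import Mathlib
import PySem

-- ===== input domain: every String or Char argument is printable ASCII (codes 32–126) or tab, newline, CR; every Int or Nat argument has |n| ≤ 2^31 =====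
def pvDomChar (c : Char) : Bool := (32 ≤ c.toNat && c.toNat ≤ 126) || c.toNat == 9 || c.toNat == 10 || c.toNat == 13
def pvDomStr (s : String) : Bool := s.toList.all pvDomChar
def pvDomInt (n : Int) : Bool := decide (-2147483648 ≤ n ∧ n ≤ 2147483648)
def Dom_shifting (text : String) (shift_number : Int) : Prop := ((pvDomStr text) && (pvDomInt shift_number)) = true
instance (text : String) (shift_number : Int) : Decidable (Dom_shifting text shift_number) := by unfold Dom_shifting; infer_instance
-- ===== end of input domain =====

-- B builds a translation table over the distinct characters and maps through it in one pass,
-- instead of A's inline accumulation loop.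

-- ===== PORT A =====
def shifting (text : String) (shift_number : Int) : String :=
  String.mk (text.toList.foldl (fun result i =>
    let shifted := PySem.Int.mod ((i.toNat : Int) + shift_number) 127
    let shifted := if shifted ≤ 32 then shifted + 32 else shifted
    result ++ [Char.ofNat shifted.toNat]) [])

-- ===== PORT B =====
-- B's per-character shifted value ((ord(c)+shift_number)%127, +32 if ≤32), as a char
def shiftChar (c : Char) (shift_number : Int) : Char :=
  let shifted := PySem.Int.mod ((c.toNat : Int) + shift_number) 127
  let shifted := if shifted ≤ 32 then shifted + 32 else shifted
  Char.ofNat shifted.toNat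

def shifting_alt (text : String) (shift_number : Int) : String :=
  let table := (PySem.List.dedup text.toList).foldl
    (fun d c => d.insert ((c.toNat : Int)) (shiftChar c shift_number)) PySem.Dict.empty
  -- str.translate: each char is replaced by its table entry (left unchanged when absent)
  String.mk (text.toList.map (fun c => ((table.get? ((c.toNat : Int))).getD c)))

-- ===== PRECONDITION & SPEC =====
def Spec_shifting (text : String) (shift_number : Int) (out : String) : Prop := out = shifting_alt text shift_number
instance (text : String) (shift_number : Int) (out : String) : Decidable (Spec_shifting text shift_number out) := by unfold Spec_shifting; infer_instance

-- ===== CLAIM (what is proved, stated in full; the proofs are below) =====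
def Claim_equal_shifting : Prop := ∀ (text : String) (shift_number : Int), Dom_shifting text shift_number → Spec_shifting text shift_number (shifting text shift_number)

-- ===== LEMMAS AND PROOFS =====

lemma key_ne_of_ne {c c' : Char} (h : c ≠ c') : ((c.toNat : Int)) ≠ ((c'.toNat : Int)) := by
  intro he
  exact h (Char.ext (UInt32.toNat_inj.mp (by exact_mod_cast he)))

lemma lookup_fold_of_not_mem (s : Int) (ys : List Char) (d : PySem.Dict Int Char) (c : Char)
    (h : c ∉ ys) :
    (ys.foldl (fun d x => d.insert ((x.toNat : Int)) (shiftChar x s)) d).get? ((c.toNat : Int))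
      = d.get? ((c.toNat : Int)) := by
  induction ys generalizing d with
  | nil => rfl
  | cons y ys ih =>
    simp only [List.foldl_cons]
    rw [ih _ (fun hm => h (List.mem_cons_of_mem _ hm)),
        PySem.Dict.get?_insert_of_ne _ _ (key_ne_of_ne (fun he : c = y => h (he ▸ List.mem_cons_self)))]

lemma lookup_fold_of_mem (s : Int) (ys : List Char) (d : PySem.Dict Int Char) (c : Char)
    (h : c ∈ ys) :
    (ys.foldl (fun d x => d.insert ((x.toNat : Int)) (shiftChar x s)) d).get? ((c.toNat : Int))
      = some (shiftChar c s) := by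
  induction ys generalizing d with
  | nil => cases h
  | cons y ys ih =>
    simp only [List.foldl_cons]
    by_cases hc : c ∈ ys
    · exact ih _ hc
    · have hcy : c = y := by
        rcases List.mem_cons.mp h with h1 | h2
        · exact h1
        · exact absurd h2 hc
      subst hcy
      rw [lookup_fold_of_not_mem s ys _ c hc, PySem.Dict.get?_insert_self]

-- ===== VERDICT (by name: the statement is the Claim_ definition above) =====
theorem shifting_spec : Claim_equal_shifting := by
  intro text shift_number _
  show _ = _
  unfold shifting shifting_alt
  rw [PySem.List.foldl_append_singleton_eq_map]
  simp only [List.nil_append]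
  congr 1
  apply List.map_congr_left
  intro c hc
  rw [lookup_fold_of_mem shift_number _ _ c ((PySem.List.mem_dedup _ _).mpr hc)]
  rfl
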